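-- pv_equiv track=rewrite | github.com/joaocarlos-losfe/Python-Pyqt5-Kanban | string_cheks.py | is_space_or_null
-- ===== SOURCE A (Python) =====
-- def is_space_or_null(string):
--     is_invalid = False
--
--     if len(string) == 0:
--         is_invalid = True
--     else:
--         for char in string:
--             if char == "" or char == " ":
--                 is_invalid = True
--             else:
--                 is_invalid = False
--                 break
--     return is_invalid
-- ===== SOURCE B (Python) =====
-- def is_space_or_null(string):
--     return set(string) <= {" "}
-- ===== Notes on version B (the rewrite author's own statement) =====
-- stated objective: idiomatic
-- what changed: Replaces the explicit flag-and-break loop with a single set-subset test: the set of distinct characters of the string must be contained in the singleton set of the space character (true for the empty string too).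
import Mathlib
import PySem

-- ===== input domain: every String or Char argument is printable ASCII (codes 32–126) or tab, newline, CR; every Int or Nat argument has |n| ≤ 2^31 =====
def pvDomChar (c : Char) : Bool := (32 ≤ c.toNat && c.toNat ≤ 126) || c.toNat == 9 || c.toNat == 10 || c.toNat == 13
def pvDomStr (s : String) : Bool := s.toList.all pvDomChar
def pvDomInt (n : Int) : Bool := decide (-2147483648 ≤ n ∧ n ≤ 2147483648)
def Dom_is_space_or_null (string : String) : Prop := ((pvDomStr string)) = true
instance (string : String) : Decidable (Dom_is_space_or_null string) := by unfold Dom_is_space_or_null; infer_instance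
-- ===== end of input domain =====

-- B replaces A's flag-and-break loop with one set-subset test (idiomatic; same cost).

-- ===== PORT A =====
-- the for-loop with its running is_invalid flag and break
def is_space_or_null_loop (is_invalid : Bool) : List Char → Bool
  | [] => is_invalid
  | c :: rest => if c == ' ' then is_space_or_null_loop true rest else false

def is_space_or_null (string : String) : Bool :=
  if string.toList.length == 0 then true
  else is_space_or_null_loop false string.toList

-- ===== PORT B =====
def is_space_or_null_alt (string : String) : Bool :=
  PySem.Set.issubset (PySem.Set.ofList string.toList) [' ']

-- ===== PRECONDITION & SPEC =====
def Spec_is_space_or_null (string : String) (out : Bool) : Prop := out = is_space_or_null_alt string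
instance (string : String) (out : Bool) : Decidable (Spec_is_space_or_null string out) := by unfold Spec_is_space_or_null; infer_instance

-- ===== CLAIM (what is proved, stated in full; the proofs are below) =====
def Claim_equal_is_space_or_null : Prop := ∀ (string : String), Dom_is_space_or_null string → Spec_is_space_or_null string (is_space_or_null string)

-- ===== LEMMAS AND PROOFS =====
theorem loop_eq_all (l : List Char) :
    is_space_or_null_loop true l = l.all (· == ' ') := by
  induction l with
  | nil => rfl
  | cons c r ih =>
      simp only [is_space_or_null_loop, List.all_cons]
      by_cases h : c = ' ' <;> simp [h, ih]

theorem portA_eq_all (s : String) :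
    is_space_or_null s = s.toList.all (· == ' ') := by
  unfold is_space_or_null
  cases h : s.toList with
  | nil => simp
  | cons c r =>
      simp only [List.length_cons, is_space_or_null_loop]
      by_cases hc : c = ' ' <;> simp [hc, loop_eq_all]

theorem portB_eq_all (s : String) :
    is_space_or_null_alt s = s.toList.all (· == ' ') := by
  unfold is_space_or_null_alt
  rcases h : PySem.Set.issubset (PySem.Set.ofList s.toList) [' '] with _ | _
  · symm
    rw [List.all_eq_false]
    have h' : ¬ ∀ x ∈ PySem.Set.ofList s.toList, x ∈ [' '] := by
      rw [← PySem.Set.issubset_iff]; simp [h]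
    push_neg at h'
    obtain ⟨x, hx, hx'⟩ := h'
    refine ⟨x, (PySem.Set.mem_ofList _ _).mp hx, by simpa using hx'⟩
  · symm
    rw [List.all_eq_true]
    intro x hx
    have := (PySem.Set.issubset_iff _ _).mp h x (((PySem.Set.mem_ofList _ _).mpr hx))
    simpa using this

-- ===== VERDICT (by name: the statement is the Claim_ definition above) =====
theorem is_space_or_null_spec : Claim_equal_is_space_or_null := by
  intro s _
  unfold Spec_is_space_or_null
  rw [portA_eq_all, portB_eq_all]
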